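-- pv_equiv track=rewrite | github.com/aopolin-lv/RoboMP2 | data_process/utils.py | handle_same_shape
-- ===== SOURCE A (Python) =====
-- from typing import List, Callable, Dict
--
-- def is_assignment(code: str) -> bool:
--     if not code or " = " not in code:
--         return False
--     parts = code.split("= ", 1)
--     if len(parts) < 2:
--         return False
--     value = parts[1].strip()
--     return (value.startswith('"') and value.endswith('"')) or (value.startswith("'") and value.endswith("'"))
--
-- def handle_same_shape(codes: List[str]) -> List[str]:
--     return_code = []
--     for code in codes:
--         if code and (is_assignment(code) or any(keyword in code for keyword in ["GetObsImage", "query = ", "GetAllSameProfileObjects", "MultiPPWithSame", "MMPROBO.generate"])):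
--             return_code.append(code)
--         elif "return info" in code:
--             break
--     return return_code
-- ===== SOURCE B (Python) =====
-- KEYWORDS = ["GetObsImage", "query = ", "GetAllSameProfileObjects", "MultiPPWithSame", "MMPROBO.generate"]
--
-- def is_assignment(code: str) -> bool:
--     if not code or " = " not in code:
--         return False
--     parts = code.split("= ", 1)
--     if len(parts) < 2:
--         return False
--     value = parts[1].strip()
--     return (value.startswith('"') and value.endswith('"')) or (value.startswith("'") and value.endswith("'"))
--
-- def _keep(code: str) -> bool:
--     return bool(code) and (is_assignment(code) or any(kw in code for kw in KEYWORDS))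
--
-- def handle_same_shape(codes):
--     # Single BACKWARD pass: collect kept lines back-to-front; on reaching a
--     # stop marker ('return info' line that is not itself kept) everything
--     # collected so far lies after the (leftmost-so-far) cut and is discarded.
--     acc = []
--     for c in reversed(codes):
--         if _keep(c):
--             acc.append(c)
--         elif "return info" in c:
--             acc.clear()
--     return acc[::-1]
-- ===== Notes on version B (the rewrite author's own statement) =====
-- stated objective: alternative
-- what changed: Replaced A's forward loop with break by a single backward traversal that builds the output back-to-front, discarding the accumulator whenever a stop marker is reached (the leftmost stop wins), and reverses once at the end; no break/early exit is needed.
import Mathlib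
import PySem

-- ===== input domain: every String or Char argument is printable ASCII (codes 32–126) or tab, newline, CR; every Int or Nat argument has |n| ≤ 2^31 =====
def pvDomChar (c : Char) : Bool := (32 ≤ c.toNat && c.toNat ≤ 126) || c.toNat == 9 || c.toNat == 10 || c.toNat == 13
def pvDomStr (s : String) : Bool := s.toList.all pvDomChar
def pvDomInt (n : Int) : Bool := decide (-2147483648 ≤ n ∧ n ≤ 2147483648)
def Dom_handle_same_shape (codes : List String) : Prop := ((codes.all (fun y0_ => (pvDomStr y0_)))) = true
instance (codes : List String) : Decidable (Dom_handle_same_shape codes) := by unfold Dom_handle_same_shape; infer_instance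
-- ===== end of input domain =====

-- B traverses the list once BACKWARD, building the output back-to-front and discarding the
-- accumulator at each stop marker, instead of A's forward loop with break (objective: alternative).

-- ===== PORT A =====
-- shared-module helper is_assignment, transliterated
def is_assignment (code : String) : Bool :=
  if code == "" || !(PySem.Str.isIn " = " code) then false
  else
    let parts := (PySem.Str.splitMax? code "= " 1).getD []
    if parts.length < 2 then false
    else
      let value := PySem.Str.strip ((PySem.List.pyGet? parts 1).getD "")
      (PySem.Str.startswith value "\"" && PySem.Str.endswith value "\"") ||
      (PySem.Str.startswith value "'" && PySem.Str.endswith value "'")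

-- A's single forward loop: append matching lines, break at a non-kept 'return info' line
def handle_same_shape_loop : List String → List String
  | [] => []
  | code :: rest =>
    if !(code == "") && (is_assignment code ||
        ["GetObsImage", "query = ", "GetAllSameProfileObjects", "MultiPPWithSame", "MMPROBO.generate"].any
          (fun keyword => PySem.Str.isIn keyword code)) then
      code :: handle_same_shape_loop rest
    else if PySem.Str.isIn "return info" code then []
    else handle_same_shape_loop rest

def handle_same_shape (codes : List String) : List String :=
  handle_same_shape_loop codes

-- ===== PORT B =====
def pvKEYWORDS : List String :=
  ["GetObsImage", "query = ", "GetAllSameProfileObjects", "MultiPPWithSame", "MMPROBO.generate"]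

def pvKeep (code : String) : Bool :=
  !(code == "") && (is_assignment code || pvKEYWORDS.any (fun kw => PySem.Str.isIn kw code))

-- B's backward pass: 'for c in reversed(codes)' = foldl over codes.reverse;
-- acc.append → acc ++ [c]; acc.clear() → []; the final acc[::-1] is List.reverse (exact for step -1 full slice)
def handle_same_shape_alt (codes : List String) : List String :=
  (codes.reverse.foldl
    (fun acc c =>
      if pvKeep c then acc ++ [c]
      else if PySem.Str.isIn "return info" c then []
      else acc) []).reverse

-- ===== PRECONDITION & SPEC =====
def Spec_handle_same_shape (codes : List String) (out : List String) : Prop := out = handle_same_shape_alt codes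
instance (codes : List String) (out : List String) : Decidable (Spec_handle_same_shape codes out) := by unfold Spec_handle_same_shape; infer_instance

-- ===== CLAIM (what is proved, stated in full; the proofs are below) =====
def Claim_equal_handle_same_shape : Prop := ∀ (codes : List String), Dom_handle_same_shape codes → Spec_handle_same_shape codes (handle_same_shape codes)

-- ===== LEMMAS AND PROOFS =====
theorem loop_eq_backward (codes : List String) :
    handle_same_shape_loop codes =
      (codes.reverse.foldl
        (fun acc c =>
          if pvKeep c then acc ++ [c]
          else if PySem.Str.isIn "return info" c then []
          else acc) []).reverse := by
  induction codes with
  | nil => rfl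
  | cons c rest ih =>
    rw [handle_same_shape_loop]
    show (if pvKeep c then c :: handle_same_shape_loop rest
          else if PySem.Str.isIn "return info" c then [] else handle_same_shape_loop rest) = _
    rw [List.reverse_cons, List.foldl_append]
    by_cases hk : pvKeep c = true
    · simp [hk, ih]
    · by_cases hr : PySem.Str.isIn "return info" c = true
      all_goals simp [PySem.Str.isIn] at hr
      · simp [hk, hr]
      · simp [hk, hr, ih]

-- ===== VERDICT (by name: the statement is the Claim_ definition above) =====
theorem handle_same_shape_spec : Claim_equal_handle_same_shape := by
  intro codes _
  unfold Spec_handle_same_shape handle_same_shape handle_same_shape_alt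
  exact loop_eq_backward codes
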